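-- pv_equiv track=rewrite | github.com/whale0112/FirstWeb | 08/문제10.py | solution
-- ===== SOURCE A (Python) =====
-- def solution(time_table, n):
--     answer = 0
--     count = [0] * n
--     b = 0
--     for a in range(0, len(time_table), 1):
--         count[b] += time_table[a]
--         if b == n - 1:
--             b = 0
--         else:
--             b += 1
--     for c in count:
--         if c > answer:
--             answer = c
--
--     return answer
-- ===== SOURCE B (Python) =====
-- def solution(time_table, n):
--     best = 0
--     for i in range(n):
--         s = 0
--         for a in range(i, len(time_table), n):
--             s += time_table[a]
--         if s > best:
--             best = s
--     return best
-- ===== Notes on version B (the rewrite author's own statement) =====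
-- stated objective: alternative
-- what changed: Replaces A's single round-robin pass that maintains an n-bucket array with a rotating bucket pointer by n independent strided scans (bucket i is summed directly over positions i, i+n, i+2n, ...) with a running max, so no bucket array exists at all.
import Mathlib
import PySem

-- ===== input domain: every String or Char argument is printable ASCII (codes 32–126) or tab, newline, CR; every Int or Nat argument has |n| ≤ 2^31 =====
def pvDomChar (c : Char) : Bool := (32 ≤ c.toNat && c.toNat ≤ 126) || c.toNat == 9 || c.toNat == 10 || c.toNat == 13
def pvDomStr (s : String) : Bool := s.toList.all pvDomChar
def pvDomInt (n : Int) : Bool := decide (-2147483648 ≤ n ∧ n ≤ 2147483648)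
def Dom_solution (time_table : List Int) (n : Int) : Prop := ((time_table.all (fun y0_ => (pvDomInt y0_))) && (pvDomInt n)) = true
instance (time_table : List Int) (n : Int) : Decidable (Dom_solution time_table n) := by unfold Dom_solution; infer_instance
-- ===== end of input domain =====

-- B replaces A's single round-robin pass over an n-bucket array by n independent strided scans with a running max (alternative decomposition, same cost); return values agree wherever A returns.


-- ===== PORT A =====
def solution (time_table : List Int) (n : Int) : Int :=
  let answer : Int := 0
  let count : List Int := PySem.List.pyRepeat [(0 : Int)] n
  let st := (PySem.List.pyRange 0 (PySem.List.len time_table) 1).foldl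
      (fun (s : List Int × Int) (a : Int) =>
        (PySem.List.pySetD s.1 s.2 (PySem.List.pyGetD s.1 s.2 0 + PySem.List.pyGetD time_table a 0),
         if s.2 == n - 1 then 0 else s.2 + 1))
      (count, (0 : Int))
  st.1.foldl (fun ans c => if c > ans then c else ans) answer

-- ===== PORT B =====
def solution_alt (time_table : List Int) (n : Int) : Int :=
  (PySem.List.pyRange 0 n 1).foldl
    (fun (best : Int) (i : Int) =>
      let s := (PySem.List.pyRange i (PySem.List.len time_table) n).foldl
        (fun (acc : Int) (a : Int) => acc + PySem.List.pyGetD time_table a 0) 0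
      if s > best then s else best)
    0

-- ===== PRECONDITION & SPEC =====
-- Pre_ excludes exactly the inputs where A raises IndexError (n <= 0 with a non-empty list: count = [0]*n is empty).
def Pre_solution (time_table : List Int) (n : Int) : Prop := 1 ≤ n ∨ time_table = []
instance (time_table : List Int) (n : Int) : Decidable (Pre_solution time_table n) := by unfold Pre_solution; infer_instance
def pvWitness_solution : List Int × Int := ([1, -2, 3, 4], 2)

def Spec_solution (time_table : List Int) (n : Int) (out : Int) : Prop := out = solution_alt time_table n
instance (time_table : List Int) (n : Int) (out : Int) : Decidable (Spec_solution time_table n out) := by unfold Spec_solution; infer_instance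

-- ===== CLAIM (what is proved, stated in full; the proofs are below) =====
def Claim_equal_solution : Prop := ∀ (time_table : List Int) (n : Int), Dom_solution time_table n → Pre_solution time_table n → Spec_solution time_table n (solution time_table n)

-- ===== LEMMAS AND PROOFS =====

-- Bucket sums: G N tt j = sum of tt at positions j, j+N, j+2N, …
def G (N : Nat) : List Int → Nat → Int
  | [], _ => 0
  | t :: r, 0 => t + G N r (N - 1)
  | _ :: r, j + 1 => G N r j

-- which stride class index i falls into when the round-robin pointer currently stands at b
def off (N i b : Nat) : Nat := if b ≤ i then i - b else i + N - b

lemma pyRangePos_nil {s : Int} (a b : Int) (hs : 0 < s) (h : b ≤ a) :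
    PySem.List.pyRange a b s = [] := by
  rw [PySem.List.pyRange_of_pos a b hs]
  simp [show ¬ a < b by omega]

lemma pyRangePos_shift {s : Int} (a b : Int) (hs : 0 < s) :
    PySem.List.pyRange (a + 1) (b + 1) s = (PySem.List.pyRange a b s).map (· + 1) := by
  rw [PySem.List.pyRange_of_pos _ _ hs, PySem.List.pyRange_of_pos _ _ hs, List.map_map]
  have hc : (if a + 1 < b + 1 then ((b + 1 - (a + 1) + s - 1) / s).toNat else 0)
      = (if a < b then ((b - a + s - 1) / s).toNat else 0) := by
    have h1 : b + 1 - (a + 1) = b - a := by ring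
    rw [h1]; split_ifs <;> omega
  rw [hc]
  apply List.map_congr_left
  intro k _
  simp only [Function.comp_apply]
  ring

lemma pyRangePos_cons {s : Int} (a b : Int) (hs : 0 < s) (h : a < b) :
    PySem.List.pyRange a b s = a :: PySem.List.pyRange (a + s) b s := by
  rw [PySem.List.pyRange_of_pos _ _ hs, PySem.List.pyRange_of_pos _ _ hs]
  have key : ((b - a + s - 1) / s).toNat = ((b - a - 1) / s).toNat + 1 := by
    have : b - a + s - 1 = (b - a - 1) + 1 * s := by ring
    rw [this, Int.add_mul_ediv_right _ _ (by omega : s ≠ 0)]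
    have h0 : 0 ≤ (b - a - 1) / s := Int.ediv_nonneg (by omega) (by omega)
    omega
  rw [if_pos h, key]
  by_cases h2 : a + s < b
  · rw [if_pos h2]
    have : b - (a + s) + s - 1 = b - a - 1 := by ring
    rw [this, List.range_succ_eq_map]
    simp only [List.map_cons, List.map_map, List.cons.injEq]
    constructor
    · ring
    · apply List.map_congr_left; intro k _; simp only [Function.comp_apply]; push_cast; ring
  · rw [if_neg h2]
    have hz : (b - a - 1) / s = 0 := Int.ediv_eq_zero_of_lt (by omega) (by omega)
    rw [hz]
    simp

lemma pyGetD_cons_succ' (t : Int) (r : List Int) (x : Int) (hx : 0 ≤ x) :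
    PySem.List.pyGetD (t :: r) (x + 1) 0 = PySem.List.pyGetD r x 0 := by
  obtain ⟨m, rfl⟩ := Int.eq_ofNat_of_zero_le hx
  have : ((m : Int) + 1) = ((m + 1 : Nat) : Int) := by push_cast; ring
  rw [this, PySem.List.pyGetD_natCast, PySem.List.pyGetD_natCast]
  simp

lemma bridgeB {n : Int} (hn : 0 < n) : ∀ (tt : List Int) (j : Nat),
    ((PySem.List.pyRange (j : Int) (tt.length : Int) n).map
      (fun a => PySem.List.pyGetD tt a 0)).sum = G n.toNat tt j := by
  intro tt
  induction tt with
  | nil =>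
    intro j
    rw [pyRangePos_nil _ _ hn (by simp)]
    rfl
  | cons t r ih =>
    intro j
    cases j with
    | zero =>
      have hlen : ((t :: r).length : Int) = (r.length : Int) + 1 := by push_cast [List.length_cons]; ring
      simp only [Nat.cast_zero]
      rw [hlen, pyRangePos_cons _ _ hn (by omega)]
      have hsh : PySem.List.pyRange ((0 : Int) + n) ((r.length : Int) + 1) n
          = (PySem.List.pyRange (n - 1) (r.length : Int) n).map (· + 1) := by
        have : (0 : Int) + n = (n - 1) + 1 := by ring
        rw [this, pyRangePos_shift _ _ hn]
      rw [hsh]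
      simp only [List.map_cons, List.map_map, List.sum_cons]
      have hhead : PySem.List.pyGetD (t :: r) (0 : Int) 0 = t := PySem.List.pyGetD_zero_cons _ _ _
      have htail : ((PySem.List.pyRange (n - 1) (r.length : Int) n).map
          ((fun a => PySem.List.pyGetD (t :: r) a 0) ∘ (· + 1))).sum = G n.toNat r (n.toNat - 1) := by
        have hcongr : (PySem.List.pyRange (n - 1) (r.length : Int) n).map
            ((fun a => PySem.List.pyGetD (t :: r) a 0) ∘ (· + 1))
            = (PySem.List.pyRange (n - 1) (r.length : Int) n).map (fun a => PySem.List.pyGetD r a 0) := by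
          apply List.map_congr_left
          intro x hx
          have hmem := (PySem.List.mem_pyRange_iff_of_pos hn x).mp hx
          exact pyGetD_cons_succ' t r x (by omega)
        rw [hcongr]
        have hcast : (n - 1 : Int) = ((n.toNat - 1 : Nat) : Int) := by omega
        rw [hcast]
        exact ih (n.toNat - 1)
      rw [hhead, htail]
      rfl
    | succ j =>
      have hlen : ((t :: r).length : Int) = (r.length : Int) + 1 := by push_cast [List.length_cons]; ring
      have hj1 : ((j + 1 : Nat) : Int) = ((j : Nat) : Int) + 1 := by push_cast; ring
      rw [hlen, hj1, pyRangePos_shift _ _ hn, List.map_map]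
      have hcongr : (PySem.List.pyRange (j : Int) (r.length : Int) n).map
          ((fun a => PySem.List.pyGetD (t :: r) a 0) ∘ (· + 1))
          = (PySem.List.pyRange (j : Int) (r.length : Int) n).map (fun a => PySem.List.pyGetD r a 0) := by
        apply List.map_congr_left
        intro x hx
        have hmem := (PySem.List.mem_pyRange_iff_of_pos hn x).mp hx
        exact pyGetD_cons_succ' t r x (by omega)
      rw [hcongr, ih j]
      rfl

lemma getD_replicate_zero (N i : Nat) : (List.replicate N (0 : Int)).getD i 0 = 0 := by
  rcases lt_or_ge i N with h | h
  · simp [List.getD_eq_getElem?_getD, h]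
  · simp [List.getD_eq_getElem?_getD, show ¬ i < N by omega]

lemma A_inv {n : Int} (hn : 0 < n) : ∀ (tt c : List Int) (b : Nat),
    c.length = n.toNat → b < n.toNat →
    (tt.foldl (fun (s : List Int × Int) (v : Int) =>
        (PySem.List.pySetD s.1 s.2 (PySem.List.pyGetD s.1 s.2 0 + v),
         if s.2 == n - 1 then 0 else s.2 + 1)) (c, (b : Int))).1
      = (List.range n.toNat).map (fun i => c.getD i 0 + G n.toNat tt (off n.toNat i b)) := by
  intro tt
  induction tt with
  | nil =>
    intro c b hc hb
    simp only [List.foldl_nil]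
    symm
    apply List.ext_getElem
    · simp [hc]
    · intro i h1 h2
      simp only [List.getElem_map, List.getElem_range]
      have : G n.toNat [] (off n.toNat i b) = 0 := rfl
      rw [this, add_zero, List.getD_eq_getElem?_getD, List.getElem?_eq_getElem h2]
      rfl
  | cons t r ih =>
    intro c b hc hb
    simp only [List.foldl_cons]
    set b' : Nat := if b = n.toNat - 1 then 0 else b + 1 with hb'
    have hbint : (if ((b : Int) == n - 1) then (0 : Int) else (b : Int) + 1) = ((b' : Nat) : Int) := by
      rw [hb']
      by_cases h : b = n.toNat - 1
      · rw [if_pos (by simp only [beq_iff_eq]; omega), if_pos h]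
        simp
      · rw [if_neg (by simp only [beq_iff_eq]; omega), if_neg h]
        push_cast
        ring
    have hset : PySem.List.pySetD c (b : Int) (PySem.List.pyGetD c (b : Int) 0 + t)
        = c.set b (c.getD b 0 + t) := by
      rw [PySem.List.pySetD_natCast, PySem.List.pyGetD_natCast]
    rw [hbint, hset]
    rw [ih (c.set b (c.getD b 0 + t)) b' (by simp [hc]) (by rw [hb']; split <;> omega)]
    apply List.map_congr_left
    intro i hi
    have hiN : i < n.toNat := List.mem_range.mp hi
    have hgetD : (c.set b (c.getD b 0 + t)).getD i 0
        = if i = b then c.getD b 0 + t else c.getD i 0 := by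
      by_cases h : i = b
      · subst h
        simp [List.getD_eq_getElem?_getD, hc, hiN]
      · rw [if_neg h]
        rw [List.getD_eq_getElem?_getD,
            List.getElem?_set_ne (show b ≠ i from fun hh => h hh.symm),
            ← List.getD_eq_getElem?_getD]
    rw [hgetD]
    by_cases h : i = b
    · subst h
      have h1 : off n.toNat i i = 0 := by unfold off; simp
      have h2 : off n.toNat i b' = n.toNat - 1 := by
        unfold off; rw [hb']; split_ifs <;> omega
      rw [if_pos rfl, h1, h2]
      show c.getD i 0 + t + G n.toNat r (n.toNat - 1) = c.getD i 0 + (t + G n.toNat r (n.toNat - 1))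
      ring
    · rw [if_neg h]
      have hoff : off n.toNat i b = off n.toNat i b' + 1 := by
        unfold off; rw [hb']; split_ifs <;> omega
      rw [hoff]
      rfl

lemma max_loop_map {α : Type} (vals : List α) (f : α -> Int) (a : Int) :
    (vals.map f).foldl (fun ans c => if c > ans then c else ans) a
      = vals.foldl (fun ans c => if f c > ans then f c else ans) a :=
  List.foldl_map ..

-- ===== VERDICT (by name: the statement is the Claim_ definition above) =====
theorem solution_spec : Claim_equal_solution := by
  intro tt n _ hpre
  unfold Spec_solution solution solution_alt
  by_cases hn : 0 < n
  · -- main case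
    simp only [PySem.List.len_eq, PySem.List.pyRepeat_singleton]
    rw [PySem.List.foldl_pyRange_zero_pyGetD' tt 0
      (fun (s : List Int × Int) (v : Int) =>
        (PySem.List.pySetD s.1 s.2 (PySem.List.pyGetD s.1 s.2 0 + v),
         if s.2 == n - 1 then 0 else s.2 + 1))
      (List.replicate n.toNat 0, (0 : Int))]
    have hA := A_inv hn tt (List.replicate n.toNat 0) 0 (by simp) (by omega)
    simp only [Nat.cast_zero] at hA
    rw [hA]
    have hcnt : (List.range n.toNat).map
        (fun i => (List.replicate n.toNat (0:Int)).getD i 0 + G n.toNat tt (off n.toNat i 0))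
        = (List.range n.toNat).map (fun i => G n.toNat tt i) := by
      apply List.map_congr_left
      intro i _
      rw [getD_replicate_zero]
      unfold off
      simp
    rw [hcnt, max_loop_map]
    -- B side
    rw [PySem.List.pyRange_one 0 n]
    have hcast : ((n : Int) - 0).toNat = n.toNat := by omega
    rw [hcast, List.foldl_map]
    apply PySem.List.foldl_congr_mem
    intro acc k hk
    have hinner : (PySem.List.pyRange (0 + (k : Int)) (tt.length : Int) n).foldl
        (fun acc a => acc + PySem.List.pyGetD tt a 0) 0 = G n.toNat tt k := by
      rw [PySem.List.foldl_add, zero_add, zero_add, bridgeB hn tt k]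
    simp only [zero_add] at hinner ⊢
    rw [hinner]
  · -- n ≤ 0, so Pre forces tt = []
    have htt : tt = [] := by
      rcases hpre with h | h
      · omega
      · exact h
    subst htt
    have hA : PySem.List.pyRange 0 (PySem.List.len ([] : List Int)) 1 = [] := by
      have hl : PySem.List.len ([] : List Int) = 0 := by simp [PySem.List.len_eq]
      rw [hl]
      exact PySem.List.pyRange_one_eq_nil (a := 0) (b := 0) (le_refl 0)
    have hB : PySem.List.pyRange 0 n 1 = [] :=
      PySem.List.pyRange_one_eq_nil (a := 0) (b := n) (show n ≤ 0 by omega)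
    rw [hA, hB]
    simp only [List.foldl_nil]
    have : PySem.List.pyRepeat [(0:Int)] n = [] := by
      rw [PySem.List.pyRepeat_singleton]
      have hz : n.toNat = 0 := by omega
      rw [hz]
      rfl
    rw [this]
    rfl
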